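-- pv_equiv track=rewrite | github.com/NeiderFajardo/ProblemasHackerRank | HackerRank/c_matrixgame.py | definirganador
-- ===== SOURCE A (Python) =====
-- def definirganador(matriz, n,m):
--     no_x = []
--     no_y = []
--     count = 1
--     seguir = True
--     ganador = 0
--     nombres = ["Ashish", "Vivek"]
--     for x in range(len(matriz)):
--         for y in range(len(matriz[x])):
--             if matriz[x][y] == 1:
--                 no_x.append(x)
--                 no_y.append(y)
--     no_x = list(set(no_x))
--     no_y = list(set(no_y))
--     while (seguir):
--         if len(no_x)+count > m or len(no_y)+count > n:
--             seguir = False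
--         count+=1
--         ganador+=1
--     return nombres[ganador%2]
-- ===== SOURCE B (Python) =====
-- def definirganador(matriz, n, m):
--     rows = {x for x, fila in enumerate(matriz) if 1 in fila}
--     cols = {y for fila in matriz for y, v in enumerate(fila) if v == 1}
--     ganador = max(1, min(m - len(rows), n - len(cols)) + 1)
--     return ["Ashish", "Vivek"][ganador % 2]
-- ===== Notes on version B (the rewrite author's own statement) =====
-- stated objective: simpler
-- what changed: The while/count loop that increments ganador until rows+count > m or cols+count > n is replaced by the closed form ganador = max(1, min(m - a, n - b) + 1), and the index-based double loop plus list(set(...)) is replaced by set comprehensions over enumerate.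
import Mathlib
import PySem

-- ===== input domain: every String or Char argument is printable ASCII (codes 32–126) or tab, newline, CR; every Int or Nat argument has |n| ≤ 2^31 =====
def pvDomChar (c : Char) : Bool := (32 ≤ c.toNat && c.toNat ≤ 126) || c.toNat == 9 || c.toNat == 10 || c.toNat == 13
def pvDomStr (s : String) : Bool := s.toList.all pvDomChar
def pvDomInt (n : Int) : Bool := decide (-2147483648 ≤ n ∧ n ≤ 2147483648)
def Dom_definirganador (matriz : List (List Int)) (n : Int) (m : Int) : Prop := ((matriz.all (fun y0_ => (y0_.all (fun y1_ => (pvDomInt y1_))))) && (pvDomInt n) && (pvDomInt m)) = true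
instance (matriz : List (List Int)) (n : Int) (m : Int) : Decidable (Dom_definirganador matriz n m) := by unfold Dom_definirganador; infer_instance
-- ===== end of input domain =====

-- B replaces A's counting while-loop by the closed form max(1, min(m-a, n-b)+1) and A's
-- index-range double loop by comprehensions over enumerate; same return value everywhere.

-- ===== PORT A =====
-- the 'while seguir' loop of A: condition tested, then count and ganador incremented;
-- 'fuel' is only a structural totality guard, always large enough at the call site
def pvLoopA (a b n m : Int) (fuel : Nat) (count ganador : Int) : Int :=
  if a + count > m ∨ b + count > n then ganador + 1
  else match fuel with
    | 0 => ganador + 1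
    | fuel + 1 => pvLoopA a b n m fuel (count + 1) (ganador + 1)

def definirganador (matriz : List (List Int)) (n : Int) (m : Int) : String :=
  let st := (PySem.List.pyRange 0 (PySem.List.len matriz) 1).foldl (fun st x =>
      (PySem.List.pyRange 0 (PySem.List.len (PySem.List.pyGetD matriz x [])) 1).foldl (fun st y =>
        if PySem.List.pyGetD (PySem.List.pyGetD matriz x []) y 0 = 1 then
          (st.1 ++ [x], st.2 ++ [y])
        else st) st)
    (([] : List Int), ([] : List Int))
  let no_x : PySem.Set Int := PySem.Set.ofList st.1
  let no_y : PySem.Set Int := PySem.Set.ofList st.2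
  let nombres := ["Ashish", "Vivek"]
  let ganador := pvLoopA (PySem.Set.len no_x) (PySem.Set.len no_y) n m
    (min (m - PySem.Set.len no_x) (n - PySem.Set.len no_y)).toNat 1 0
  -- ganador ≥ 1, so ganador % 2 ∈ {0,1} is always in range: pyGetD is exact here
  PySem.List.pyGetD nombres (PySem.Int.mod ganador 2) ""

-- ===== PORT B =====
def definirganador_alt (matriz : List (List Int)) (n : Int) (m : Int) : String :=
  let rows : PySem.Set Int :=
    PySem.Set.ofList (((PySem.List.enumerate matriz 0).filter
      (fun p => decide ((1 : Int) ∈ p.2))).map (·.1))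
  let cols : PySem.Set Int :=
    PySem.Set.ofList (matriz.flatMap (fun fila =>
      ((PySem.List.enumerate fila 0).filter (fun p => decide (p.2 = 1))).map (·.1)))
  let ganador := max 1 (min (m - PySem.Set.len rows) (n - PySem.Set.len cols) + 1)
  PySem.List.pyGetD ["Ashish", "Vivek"] (PySem.Int.mod ganador 2) ""

-- ===== PRECONDITION & SPEC =====
def Spec_definirganador (matriz : List (List Int)) (n : Int) (m : Int) (out : String) : Prop := out = definirganador_alt matriz n m
instance (matriz : List (List Int)) (n : Int) (m : Int) (out : String) : Decidable (Spec_definirganador matriz n m out) := by unfold Spec_definirganador; infer_instance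

-- ===== CLAIM (what is proved, stated in full; the proofs are below) =====
def Claim_equal_definirganador : Prop := ∀ (matriz : List (List Int)) (n : Int) (m : Int), Dom_definirganador matriz n m → Spec_definirganador matriz n m (definirganador matriz n m)

-- ===== LEMMAS AND PROOFS =====

theorem pvLoopA_eq (a b n m : Int) : ∀ (fuel : Nat) (count ganador : Int),
    (min (m - a) (n - b) + 1 - count).toNat ≤ fuel →
    pvLoopA a b n m fuel count ganador = ganador + max 1 (min (m - a) (n - b) - count + 2) := by
  intro fuel
  induction fuel with
  | zero =>
    intro count ganador h
    unfold pvLoopA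
    split
    · omega
    · omega
  | succ fuel ih =>
    intro count ganador h
    unfold pvLoopA
    split
    · omega
    · show pvLoopA a b n m fuel (count + 1) (ganador + 1) = _
      rw [ih (count + 1) (ganador + 1) (by omega)]
      omega

-- the (index, value) pairs of a row whose value is 1
def filtOnes (fila : List Int) : List (Int × Int) :=
  (PySem.List.enumerate fila 0).filter (fun p => decide (p.2 = 1))

theorem innerA_eq (x : Int) (fila : List Int) (s1 s2 : List Int) :
    (PySem.List.pyRange 0 (PySem.List.len fila) 1).foldl (fun st y =>
        if PySem.List.pyGetD fila y 0 = 1 then (st.1 ++ [x], st.2 ++ [y]) else st) (s1, s2)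
    = (s1 ++ (filtOnes fila).map (fun _ => x), s2 ++ (filtOnes fila).map (·.1)) := by
  rw [show (PySem.List.pyRange 0 (PySem.List.len fila) 1).foldl (fun st y =>
        if PySem.List.pyGetD fila y 0 = 1 then (st.1 ++ [x], st.2 ++ [y]) else st) (s1, s2)
      = (PySem.List.enumerate fila 0).foldl (fun st p =>
        if p.2 = 1 then (st.1 ++ [x], st.2 ++ [p.1]) else st) (s1, s2) from by
    rw [PySem.List.enumerate_eq_map_pyRange fila (0 : Int), List.foldl_map]]
  rw [show (fun (st : List Int × List Int) (p : Int × Int) =>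
        if p.2 = 1 then (st.1 ++ [x], st.2 ++ [p.1]) else st)
      = (fun st p => ((fun s (e : Int × Int) => if e.2 = 1 then s ++ [x] else s) st.1 p,
                      (fun s (e : Int × Int) => if e.2 = 1 then s ++ [e.1] else s) st.2 p)) from
    funext fun st => funext fun p => by by_cases h : p.2 = 1 <;> simp [h]]
  rw [PySem.List.foldl_prod_mk (f := fun s (e : Int × Int) => if e.2 = 1 then s ++ [x] else s)
        (g := fun s (e : Int × Int) => if e.2 = 1 then s ++ [e.1] else s)]
  rw [PySem.List.foldl_append_ite (p := fun e : Int × Int => e.2 = 1) (f := fun _ => x),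
      PySem.List.foldl_append_ite (p := fun e : Int × Int => e.2 = 1) (f := fun e => e.1)]
  rfl

theorem outerA_eq (matriz : List (List Int)) :
    (PySem.List.pyRange 0 (PySem.List.len matriz) 1).foldl (fun st x =>
      (PySem.List.pyRange 0 (PySem.List.len (PySem.List.pyGetD matriz x [])) 1).foldl (fun st y =>
        if PySem.List.pyGetD (PySem.List.pyGetD matriz x []) y 0 = 1 then
          (st.1 ++ [x], st.2 ++ [y])
        else st) st)
    (([] : List Int), ([] : List Int))
    = ((PySem.List.enumerate matriz 0).flatMap (fun p => (filtOnes p.2).map (fun _ => p.1)),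
       (PySem.List.enumerate matriz 0).flatMap (fun p => (filtOnes p.2).map (·.1))) := by
  rw [show (PySem.List.pyRange 0 (PySem.List.len matriz) 1).foldl (fun st x =>
      (PySem.List.pyRange 0 (PySem.List.len (PySem.List.pyGetD matriz x [])) 1).foldl (fun st y =>
        if PySem.List.pyGetD (PySem.List.pyGetD matriz x []) y 0 = 1 then
          (st.1 ++ [x], st.2 ++ [y])
        else st) st) (([] : List Int), ([] : List Int))
      = (PySem.List.enumerate matriz 0).foldl (fun st p =>
        (PySem.List.pyRange 0 (PySem.List.len p.2) 1).foldl (fun st y =>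
          if PySem.List.pyGetD p.2 y 0 = 1 then (st.1 ++ [p.1], st.2 ++ [y]) else st) st)
        (([] : List Int), ([] : List Int)) from by
    rw [PySem.List.enumerate_eq_map_pyRange matriz ([] : List Int), List.foldl_map]]
  rw [show (fun (st : List Int × List Int) (p : Int × List Int) =>
      (PySem.List.pyRange 0 (PySem.List.len p.2) 1).foldl (fun st y =>
        if PySem.List.pyGetD p.2 y 0 = 1 then (st.1 ++ [p.1], st.2 ++ [y]) else st) st)
      = (fun st p => ((fun s (e : Int × List Int) => s ++ (filtOnes e.2).map (fun _ => e.1)) st.1 p,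
                      (fun s (e : Int × List Int) => s ++ (filtOnes e.2).map (·.1)) st.2 p)) from
    funext fun st => funext fun p => by
      obtain ⟨s1, s2⟩ := st; exact innerA_eq p.1 p.2 s1 s2]
  rw [PySem.List.foldl_prod_mk
        (f := fun s (e : Int × List Int) => s ++ (filtOnes e.2).map (fun _ => e.1))
        (g := fun s (e : Int × List Int) => s ++ (filtOnes e.2).map (·.1))]
  rw [PySem.List.foldl_append_eq_flatMap, PySem.List.foldl_append_eq_flatMap]
  simp

theorem one_mem_iff (fila : List Int) :
    (∃ e ∈ PySem.List.enumerate fila 0, e.2 = 1) ↔ (1 : Int) ∈ fila := by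
  conv_rhs => rw [← PySem.List.map_snd_enumerate fila 0]
  rw [List.mem_map]

theorem rows_mem_iff (matriz : List (List Int)) (z : Int) :
    z ∈ (PySem.List.enumerate matriz 0).flatMap (fun p => (filtOnes p.2).map (fun _ => p.1))
    ↔ z ∈ ((PySem.List.enumerate matriz 0).filter (fun p => decide ((1 : Int) ∈ p.2))).map (·.1) := by
  simp only [List.mem_flatMap, List.mem_map, List.mem_filter, filtOnes, decide_eq_true_eq]
  constructor
  · rintro ⟨p, hp, e, ⟨he, h2⟩, rfl⟩
    exact ⟨p, ⟨hp, (one_mem_iff p.2).mp ⟨e, he, h2⟩⟩, rfl⟩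
  · rintro ⟨p, ⟨hp, h1⟩, rfl⟩
    obtain ⟨e, he, h2⟩ := (one_mem_iff p.2).mpr h1
    exact ⟨p, hp, e, ⟨he, h2⟩, rfl⟩

theorem rows_len_eq (matriz : List (List Int)) :
    PySem.Set.len (PySem.Set.ofList
      ((PySem.List.enumerate matriz 0).flatMap (fun p => (filtOnes p.2).map (fun _ => p.1))))
    = PySem.Set.len (PySem.Set.ofList
      (((PySem.List.enumerate matriz 0).filter (fun p => decide ((1 : Int) ∈ p.2))).map (·.1))) := by
  have hperm : (PySem.Set.ofList
      ((PySem.List.enumerate matriz 0).flatMap (fun p => (filtOnes p.2).map (fun _ => p.1)))).Perm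
      (PySem.Set.ofList
      (((PySem.List.enumerate matriz 0).filter (fun p => decide ((1 : Int) ∈ p.2))).map (·.1))) := by
    rw [List.perm_ext_iff_of_nodup (PySem.Set.nodup_ofList _) (PySem.Set.nodup_ofList _)]
    intro z
    rw [PySem.Set.mem_ofList, PySem.Set.mem_ofList]
    exact rows_mem_iff matriz z
  simp only [PySem.Set.len]
  exact_mod_cast hperm.length_eq

theorem cols_list_eq (matriz : List (List Int)) :
    (PySem.List.enumerate matriz 0).flatMap (fun p => (filtOnes p.2).map (·.1))
    = matriz.flatMap (fun fila =>
        ((PySem.List.enumerate fila 0).filter (fun p => decide (p.2 = 1))).map (·.1)) := by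
  conv_rhs => rw [← PySem.List.map_snd_enumerate matriz 0]
  rw [List.flatMap_map]
  rfl

-- ===== VERDICT (by name: the statement is the Claim_ definition above) =====
theorem definirganador_spec : Claim_equal_definirganador := by
  intro matriz n m _
  unfold Spec_definirganador
  simp only [definirganador, definirganador_alt]
  rw [outerA_eq]
  rw [pvLoopA_eq _ _ n m _ 1 0 (by omega)]
  rw [show ((PySem.List.enumerate matriz 0).flatMap (fun p => (filtOnes p.2).map (fun _ => p.1)),
        (PySem.List.enumerate matriz 0).flatMap (fun p => (filtOnes p.2).map (·.1))).1
      = (PySem.List.enumerate matriz 0).flatMap (fun p => (filtOnes p.2).map (fun _ => p.1)) from rfl]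
  rw [show ((PySem.List.enumerate matriz 0).flatMap (fun p => (filtOnes p.2).map (fun _ => p.1)),
        (PySem.List.enumerate matriz 0).flatMap (fun p => (filtOnes p.2).map (·.1))).2
      = (PySem.List.enumerate matriz 0).flatMap (fun p => (filtOnes p.2).map (·.1)) from rfl]
  rw [rows_len_eq, cols_list_eq]
  congr 2
  omega
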